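-- pv_equiv track=rewrite | github.com/anthonytk31415/leetcode | python-fundamentals/backtracking/productQueries.py | binarySearchLargestPowerTwo
-- ===== SOURCE A (Python) =====
-- def binarySearchLargestPowerTwo(n):
--     left = 0
--     right = 30
--     while left + 1 < right:
--         mid = (left + right)//2
--         if 2**mid == n:
--             return mid
--         if 2**mid < n:
--             left = mid
--         else:
--             right = mid
--     return left
-- ===== SOURCE B (Python) =====
-- def binarySearchLargestPowerTwo(n):
--     e = 0
--     while e < 29 and 2 ** (e + 1) <= n:
--         e += 1
--     return e
-- ===== Notes on version B (the rewrite author's own statement) =====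
-- stated objective: simpler
-- what changed: Replaces the binary search over the fixed exponent interval with a single ascending linear scan of the exponent that stops as soon as the next power of two exceeds n, preserving A's exact values including its behaviour on non-positive n and its upper cap.
import Mathlib
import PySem

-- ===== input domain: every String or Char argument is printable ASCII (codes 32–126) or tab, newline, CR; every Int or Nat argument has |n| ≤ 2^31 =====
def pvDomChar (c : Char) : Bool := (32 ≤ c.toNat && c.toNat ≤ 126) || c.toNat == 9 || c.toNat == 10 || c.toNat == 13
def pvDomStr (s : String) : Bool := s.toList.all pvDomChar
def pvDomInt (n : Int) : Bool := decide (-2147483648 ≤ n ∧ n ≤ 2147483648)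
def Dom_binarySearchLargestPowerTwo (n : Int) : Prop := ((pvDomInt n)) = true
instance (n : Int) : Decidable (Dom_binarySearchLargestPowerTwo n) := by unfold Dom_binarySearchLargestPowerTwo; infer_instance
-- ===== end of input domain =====

-- B replaces A's binary search over exponents [0,30] with one ascending linear scan of the exponent (simpler).


-- ===== PORT A =====
-- A's while loop, ported with fuel (8 ≥ the at most 5 iterations the interval [0,30] allows, so with
-- this fuel the recursion exits exactly where Python's while does and the port is exact).
-- 2**mid is ported as (2 : Int) ^ mid.toNat; mid is never negative here (left, right stay in [0,30]).
def pvLoopA (n : Int) : Nat → Int → Int → Int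
  | 0, left, _ => left
  | fuel + 1, left, right =>
    if left + 1 < right then
      let mid := PySem.Int.floordiv (left + right) 2
      if (2 : Int) ^ mid.toNat = n then mid
      else if (2 : Int) ^ mid.toNat < n then pvLoopA n fuel mid right
      else pvLoopA n fuel left mid
    else left

def binarySearchLargestPowerTwo (n : Int) : Int := pvLoopA n 8 0 30

-- ===== PORT B =====
-- B's while loop, ported with fuel 29 = its maximal iteration count (e goes from 0 to at most 29).
def pvLoopB (n : Int) : Nat → Int → Int
  | 0, e => e
  | fuel + 1, e => if e < 29 ∧ (2 : Int) ^ (e + 1).toNat ≤ n then pvLoopB n fuel (e + 1) else e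

def binarySearchLargestPowerTwo_alt (n : Int) : Int := pvLoopB n 29 0

-- ===== PRECONDITION & SPEC =====
def Spec_binarySearchLargestPowerTwo (n : Int) (out : Int) : Prop := out = binarySearchLargestPowerTwo_alt n
instance (n : Int) (out : Int) : Decidable (Spec_binarySearchLargestPowerTwo n out) := by unfold Spec_binarySearchLargestPowerTwo; infer_instance

-- ===== CLAIM (what is proved, stated in full; the proofs are below) =====
def Claim_equal_binarySearchLargestPowerTwo : Prop := ∀ (n : Int), Dom_binarySearchLargestPowerTwo n → Spec_binarySearchLargestPowerTwo n (binarySearchLargestPowerTwo n)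

-- ===== LEMMAS AND PROOFS =====

-- the common value both loops compute: 0 for n < 2, otherwise min 29 ⌊log₂ n⌋
def pvSpec (n : Int) : Int := if n < 2 then 0 else ((min 29 (Nat.log 2 n.toNat) : Nat) : Int)

theorem pvSpec_of_lt_two (n : Int) (h : n < 2) : pvSpec n = 0 := by
  simp [pvSpec, h]

theorem pvSpec_char (n : Int) (k : Nat) (hk1 : 1 ≤ k) (hk29 : k ≤ 29)
    (hlo : (2 : Int) ^ k ≤ n) (hhi : k = 29 ∨ n < (2 : Int) ^ (k + 1)) :
    pvSpec n = (k : Int) := by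
  have h2 : (2 : Int) ≤ 2 ^ k := by
    calc (2 : Int) = 2 ^ 1 := by ring
    _ ≤ 2 ^ k := pow_le_pow_right₀ (by norm_num) hk1
  have hn2 : (2 : Int) ≤ n := le_trans h2 hlo
  have hlo' : 2 ^ k ≤ n.toNat := by
    have : ((2 ^ k : Nat) : Int) ≤ n := by push_cast; omega
    omega
  have hne : n.toNat ≠ 0 := by omega
  have hgelog : k ≤ Nat.log 2 n.toNat := (Nat.le_log_iff_pow_le (by norm_num) hne).mpr hlo'
  rcases hhi with h29 | hhi
  · subst h29
    simp only [pvSpec, if_neg (by omega : ¬ n < 2)]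
    omega
  · have hhi' : n.toNat < 2 ^ (k + 1) := by
      have : n < ((2 ^ (k + 1) : Nat) : Int) := by push_cast; omega
      omega
    have hlog : Nat.log 2 n.toNat = k := Nat.log_eq_of_pow_le_of_lt_pow hlo' hhi'
    simp only [pvSpec, if_neg (by omega : ¬ n < 2), hlog]
    omega

-- what either loop's exit state forces: the exit lemma shared by both ports
theorem pv_exit (n : Int) (l : Nat) (hr : l + 1 ≤ 30)
    (h1 : l = 0 ∨ (2 : Int) ^ l ≤ n) (h2 : l + 1 = 30 ∨ n < (2 : Int) ^ (l + 1)) :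
    ((l : Nat) : Int) = pvSpec n := by
  rcases h1 with h0 | hle
  · subst h0
    rcases h2 with h | h
    · omega
    · rw [pvSpec_of_lt_two n (by simpa using h)]; simp
  · by_cases hl0 : l = 0
    · subst hl0
      rcases h2 with h | h
      · omega
      · rw [pvSpec_of_lt_two n (by simpa using h)]; simp
    · exact (pvSpec_char n l (by omega) (by omega) hle
        (by rcases h2 with h | h
            · left; omega
            · right; exact h)).symm

-- B's loop computes pvSpec
theorem pvLoopB_spec (n : Int) : ∀ (fuel e : Nat), e + fuel = 29 →
    (e = 0 ∨ (2 : Int) ^ e ≤ n) → pvLoopB n fuel (e : Int) = pvSpec n := by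
  intro fuel
  induction fuel with
  | zero =>
    intro e he hinv
    have : e = 29 := by omega
    subst this
    simp only [pvLoopB]
    exact pv_exit n 29 (by omega) hinv (Or.inl rfl)
  | succ fuel ih =>
    intro e he hinv
    have ht : ((e : Int) + 1).toNat = e + 1 := by omega
    simp only [pvLoopB, ht]
    by_cases hc : (2 : Int) ^ (e + 1) ≤ n
    · rw [if_pos ⟨by omega, hc⟩]
      have := ih (e + 1) (by omega) (Or.inr hc)
      push_cast at this ⊢
      exact this
    · rw [if_neg (by intro hand; exact hc hand.2)]
      exact pv_exit n e (by omega) hinv (Or.inr (by omega))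

-- A's loop computes pvSpec (invariant of the binary search)
theorem pvLoopA_spec (n : Int) : ∀ (fuel l r : Nat), l < r → r ≤ 30 →
    (l = 0 ∨ (2 : Int) ^ l ≤ n) → (r = 30 ∨ n < (2 : Int) ^ r) →
    r - l ≤ 2 ^ fuel → pvLoopA n fuel (l : Int) (r : Int) = pvSpec n := by
  intro fuel
  induction fuel with
  | zero =>
    intro l r hlr hr30 h1 h2 hw
    have : r = l + 1 := by simp at hw; omega
    subst this
    simp only [pvLoopA]
    exact pv_exit n l (by omega) h1 (by omega)
  | succ fuel ih =>
    intro l r hlr hr30 h1 h2 hw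
    simp only [pvLoopA]
    by_cases hc : (l : Int) + 1 < (r : Int)
    · rw [if_pos hc]
      have hfd : PySem.Int.floordiv ((l : Int) + (r : Int)) 2 = ((l : Int) + r) / 2 :=
        PySem.Int.floordiv_eq_ediv_of_pos (by norm_num)
      set m : Nat := (l + r) / 2 with hm
      have hmid : PySem.Int.floordiv ((l : Int) + (r : Int)) 2 = (m : Int) := by
        rw [hfd]; omega
      have hlm : l < m := by omega
      have hmr : m < r := by omega
      have htm : ((m : Int)).toNat = m := by omega
      simp only [hmid, htm]
      by_cases heq : (2 : Int) ^ m = n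
      · rw [if_pos heq]
        exact (pvSpec_char n m (by omega) (by omega) (le_of_eq heq)
          (by right; rw [← heq, pow_succ]
              have : (0 : Int) < 2 ^ m := by positivity
              omega)).symm
      · rw [if_neg heq]
        by_cases hlt : (2 : Int) ^ m < n
        · rw [if_pos hlt]
          exact ih m r hmr hr30 (Or.inr (le_of_lt hlt)) h2 (by omega)
        · rw [if_neg hlt]
          exact ih l m hlm (by omega) h1 (Or.inr (by omega)) (by omega)
    · rw [if_neg hc]
      have : r = l + 1 := by omega
      subst this
      exact pv_exit n l (by omega) h1 (by omega)

-- ===== VERDICT (by name: the statement is the Claim_ definition above) =====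
theorem binarySearchLargestPowerTwo_spec : Claim_equal_binarySearchLargestPowerTwo := by
  intro n _
  unfold Spec_binarySearchLargestPowerTwo binarySearchLargestPowerTwo binarySearchLargestPowerTwo_alt
  have hA := pvLoopA_spec n 8 0 30 (by omega) (by omega) (Or.inl rfl) (Or.inl rfl) (by norm_num)
  have hB := pvLoopB_spec n 29 0 rfl (Or.inl rfl)
  simpa using hA.trans hB.symm
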